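-- pv_equiv track=rewrite | github.com/hiremasa/atCoder | other_contents/Boot_camp_for_Beginners/Medium100/78.py | solve
-- ===== SOURCE A (Python) =====
-- from itertools import groupby
--
-- def solve(s, k):
--     rle = [len(list(g)) for c, g in groupby(s)]
--     if len(rle) == 1:
--         return len(s) * k // 2
--     ans = sum(l // 2 for l in rle) * k
--     if s[0] == s[-1] and rle[0] % 2 == 1 and rle[-1] % 2 == 1:
--         ans += k - 1
--     return ans
-- ===== SOURCE B (Python) =====
-- def _pairs(t):
--     cnt = 0
--     i = 1
--     while i < len(t):
--         if t[i] == t[i - 1]: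
--             cnt += 1
--             i += 2
--         else:
--             i += 1
--     return cnt
--
--
-- def solve(s, k):
--     if s and s == s[0] * len(s):
--         return len(s) * k // 2
--     once = _pairs(s)
--     twice = _pairs(s + s)
--     return once * k + (k - 1) * (twice - 2 * once)
-- ===== Notes on version B (the rewrite author's own statement) =====
-- stated objective: alternative
-- what changed: B drops A's run-length encoding and boundary-parity formula entirely: it counts disjoint adjacent equal pairs with a greedy skip-2 scan, applies that scan to s and to s+s, and recovers the k-fold answer linearly as once*k + (k-1)*(twice - 2*once), with a direct all-equal check for the single-run case.
import Mathlib
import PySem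

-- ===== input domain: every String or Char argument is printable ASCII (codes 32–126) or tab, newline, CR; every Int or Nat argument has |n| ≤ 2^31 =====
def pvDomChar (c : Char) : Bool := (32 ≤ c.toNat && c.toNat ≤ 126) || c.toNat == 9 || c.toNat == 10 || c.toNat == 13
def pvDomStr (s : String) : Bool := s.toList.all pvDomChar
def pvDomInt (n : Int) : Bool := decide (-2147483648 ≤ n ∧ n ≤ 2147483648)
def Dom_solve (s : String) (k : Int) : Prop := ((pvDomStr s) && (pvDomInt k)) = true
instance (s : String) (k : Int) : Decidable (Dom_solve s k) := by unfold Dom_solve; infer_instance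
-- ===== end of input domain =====

-- B drops A's run-length encoding and parity formula: it counts greedy disjoint adjacent
-- equal pairs in s and in s+s and combines them linearly in k (objective: alternative).

-- ===== PORT A =====
-- run lengths of consecutive equal characters: [len(list(g)) for c, g in groupby(s)]
def rleA (l : List Char) : List Int :=
  match l with
  | [] => []
  | c :: rest =>
      ((1 : Int) + (rest.takeWhile (· == c)).length) :: rleA (rest.dropWhile (· == c))
termination_by l.length
decreasing_by
  simp only [List.length_cons]
  exact Nat.lt_succ_of_le (List.length_dropWhile_le _ _)

def solve (s : String) (k : Int) : Int :=
  let l := s.toList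
  let rle := rleA l
  if rle.length == 1 then PySem.Int.floordiv ((l.length : Int) * k) 2
  else
    let ans := ((rle.map (fun x => PySem.Int.floordiv x 2)).sum) * k
    match PySem.List.pyGet? l 0 with
    | none => 0   -- unreachable under Pre_ (s nonempty): s[0] would raise IndexError
    | some c0 =>
      match PySem.List.pyGet? l (-1) with
      | none => 0
      | some c1 =>
        match PySem.List.pyGet? rle 0 with
        | none => 0
        | some r0 =>
          match PySem.List.pyGet? rle (-1) with
          | none => 0
          | some r1 =>
            if c0 == c1 && PySem.Int.mod r0 2 == 1 && PySem.Int.mod r1 2 == 1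
            then ans + (k - 1) else ans

-- ===== PORT B =====
-- _pairs(t): the while loop over index i (skip 2 after a counted pair, else 1) is ported
-- as the structural recursion that consumes the same characters (exact).
def pairsB (t : List Char) : Int :=
  match t with
  | [] => 0
  | [_] => 0
  | a :: b :: rest => if b == a then 1 + pairsB rest else pairsB (b :: rest)

def solve_alt (s : String) (k : Int) : Int :=
  let l := s.toList
  -- `if s and s == s[0] * len(s)` (short-circuit: s[0] is only read when s is nonempty,
  -- so the guarded headD is exact)
  if !l.isEmpty && l == List.replicate l.length (l.headD ' ') then
    PySem.Int.floordiv ((l.length : Int) * k) 2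
  else
    let once := pairsB l
    let twice := pairsB (l ++ l)
    once * k + (k - 1) * (twice - 2 * once)

-- ===== PRECONDITION & SPEC =====
-- Pre_ excludes only the empty string, on which A raises IndexError (s[0]).
def Pre_solve (s : String) (k : Int) : Prop := s ≠ ""
instance (s : String) (k : Int) : Decidable (Pre_solve s k) := by unfold Pre_solve; infer_instance
def pvWitness_solve : String × Int := ("aab", 3)

def Spec_solve (s : String) (k : Int) (out : Int) : Prop := out = solve_alt s k
instance (s : String) (k : Int) (out : Int) : Decidable (Spec_solve s k out) := by unfold Spec_solve; infer_instance

-- ===== CLAIM (what is proved, stated in full; the proofs are below) =====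
def Claim_equal_solve : Prop := ∀ (s : String) (k : Int), Dom_solve s k → Pre_solve s k → Spec_solve s k (solve s k)

-- ===== LEMMAS AND PROOFS =====

def sumHalves (L : List Int) : Int := (L.map (fun x => PySem.Int.floordiv x 2)).sum

theorem rleA_cons (c : Char) (rest : List Char) :
    rleA (c :: rest) = ((1 : Int) + ((rest.takeWhile (· == c)).length : Int))
      :: rleA (rest.dropWhile (· == c)) := by
  rw [rleA]

theorem rleA_ne_nil (c : Char) (rest : List Char) : rleA (c :: rest) ≠ [] := by
  rw [rleA_cons]; exact List.cons_ne_nil _ _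

theorem rleA_eq_nil_iff (l : List Char) : rleA l = [] ↔ l = [] := by
  cases l with
  | nil => simp [rleA]
  | cons c rest => simp [rleA_ne_nil]

-- the head of dropWhile (· == c) is never c
theorem dropWhile_head?_ne (r : List Char) (c : Char) :
    (r.dropWhile (· == c)).head? ≠ some c := by
  induction r with
  | nil => simp
  | cons b t ih =>
      by_cases h : b = c
      · simpa [List.dropWhile_cons, h] using ih
      · simp [List.dropWhile_cons, h]

-- front run decomposition: c :: rest = c-run of length m ≥ 1 ++ remainder not starting with c
theorem front_decomp (c : Char) (rest : List Char) :
    ∃ m D, c :: rest = List.replicate m c ++ D ∧ 1 ≤ m ∧ D.head? ≠ some c ∧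
      m = 1 + (rest.takeWhile (· == c)).length ∧ D = rest.dropWhile (· == c) := by
  refine ⟨1 + (rest.takeWhile (· == c)).length, rest.dropWhile (· == c), ?_, by omega,
    dropWhile_head?_ne rest c, rfl, rfl⟩
  have hT : rest.takeWhile (· == c) = List.replicate (rest.takeWhile (· == c)).length c := by
    refine List.eq_replicate_of_mem ?_
    intro b hb
    simpa using List.mem_takeWhile_imp hb
  have h2 : List.replicate (1 + (rest.takeWhile (· == c)).length) c ++ rest.dropWhile (· == c)
      = c :: (rest.takeWhile (· == c) ++ rest.dropWhile (· == c)) := by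
    rw [Nat.add_comm, List.replicate_succ, List.cons_append, ← hT]
  rw [h2, List.takeWhile_append_dropWhile]

theorem replicate_getLast? (m : Nat) (c : Char) (h : 1 ≤ m) :
    (List.replicate m c).getLast? = some c := by
  obtain ⟨j, rfl⟩ : ∃ j, m = j + 1 := ⟨m - 1, by omega⟩
  rw [List.replicate_succ', List.getLast?_concat]

-- rleA over a leading run: peels exactly the run
theorem rleA_run (m : Nat) (c : Char) (y : List Char) (hm : 1 ≤ m) (hy : y.head? ≠ some c) :
    rleA (List.replicate m c ++ y) = (m : Int) :: rleA y := by
  obtain ⟨j, rfl⟩ : ∃ j, m = j + 1 := ⟨m - 1, by omega⟩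
  have hrepl : List.replicate (j + 1) c ++ y = c :: (List.replicate j c ++ y) := by
    simp [List.replicate_succ]
  rw [hrepl, rleA_cons]
  have htw : ∀ j' : Nat, ((List.replicate j' c ++ y).takeWhile (· == c)) = List.replicate j' c ∧
      ((List.replicate j' c ++ y).dropWhile (· == c)) = y := by
    intro j'
    induction j' with
    | zero =>
        cases y with
        | nil => simp
        | cons b t =>
            have hb : (b == c) = false := by
              simp only [List.head?_cons, ne_eq, Option.some.injEq] at hy
              simp [hy]
            simp [List.takeWhile_cons, List.dropWhile_cons, hb]
    | succ i ih =>
        simp [List.replicate_succ, List.takeWhile_cons, List.dropWhile_cons, ih.1, ih.2]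
  rw [(htw j).1, (htw j).2]
  simp only [List.length_replicate, List.cons.injEq]
  exact ⟨by push_cast; ring, trivial⟩

-- no merge at a junction where the characters differ
theorem rleA_append_ne_aux (y : List Char) (hy : y ≠ []) :
    ∀ (n : Nat) (x : List Char), x.length ≤ n → x.getLast? ≠ y.head? →
    rleA (x ++ y) = rleA x ++ rleA y := by
  intro n
  induction n with
  | zero =>
      intro x hx hxy
      have : x = [] := List.length_eq_zero_iff.mp (by omega)
      subst this
      simp [rleA]
  | succ n ih =>
      intro x hx hxy
      cases hxc : x with
      | nil => simp [rleA]
      | cons c rest =>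
          subst hxc
          obtain ⟨m, D, hdec, hm, hDh, hmT, hDd⟩ := front_decomp c rest
          by_cases hD : D = []
          · subst hD
            rw [List.append_nil] at hdec
            have hlast : (c :: rest).getLast? = some c := by
              rw [hdec]; exact replicate_getLast? m c hm
            have hyh : y.head? ≠ some c := by rw [← hlast]; exact fun h => hxy h.symm
            have h0 : rleA (List.replicate m c) = [(m : Int)] := by
              have h1 := rleA_run m c [] hm (by simp)
              rw [List.append_nil] at h1
              rw [h1, rleA]
            rw [hdec, rleA_run m c y hm hyh, h0]
            simp
          · have hDlen : D.length ≤ n := by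
              have h1 : (c :: rest).length = m + D.length := by
                rw [hdec]; simp
              simp only [List.length_cons] at hx h1
              omega
            have hDlast : D.getLast? = (c :: rest).getLast? := by
              rw [hdec, List.getLast?_append_of_ne_nil _ hD]
            have hDy : (D ++ y).head? ≠ some c := by
              cases D with
              | nil => exact absurd rfl hD
              | cons d t => simpa using hDh
            have step := ih D hDlen (by rw [hDlast]; exact hxy)
            rw [hdec, List.append_assoc, rleA_run m c (D ++ y) hm hDy,
              rleA_run m c D hm hDh, step]
            simp

theorem rleA_append_ne (x y : List Char) (hy : y ≠ []) (hxy : x.getLast? ≠ y.head?) :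
    rleA (x ++ y) = rleA x ++ rleA y :=
  rleA_append_ne_aux y hy x.length x le_rfl hxy

theorem pairsB_run (m : Nat) (c : Char) (y : List Char) (hy : y.head? ≠ some c) :
    pairsB (List.replicate m c ++ y) = ((m / 2 : Nat) : Int) + pairsB y := by
  induction m using Nat.strong_induction_on with
  | _ m ih =>
      match m with
      | 0 => simp
      | 1 =>
          cases y with
          | nil => simp [pairsB]
          | cons b t =>
              have hb : (b == c) = false := by
                simp only [List.head?_cons, ne_eq, Option.some.injEq] at hy
                simp [hy]
              have hbc : (b = c) = False := by simp [of_decide_eq_false hb]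
              simp [pairsB, hb]
      | j + 2 =>
          have hrw : List.replicate (j + 2) c ++ y = c :: c :: (List.replicate j c ++ y) := by
            simp [List.replicate_succ]
          rw [hrw]
          simp only [pairsB, beq_self_eq_true, if_pos]
          rw [ih j (by omega)]
          have : (j + 2) / 2 = j / 2 + 1 := by omega
          rw [this]
          push_cast
          ring

theorem sumHalves_nil : sumHalves [] = 0 := by simp [sumHalves]

theorem sumHalves_cons (a : Int) (L : List Int) :
    sumHalves (a :: L) = PySem.Int.floordiv a 2 + sumHalves L := by
  simp [sumHalves]

theorem sumHalves_append (L M : List Int) :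
    sumHalves (L ++ M) = sumHalves L + sumHalves M := by
  simp [sumHalves]

theorem pairsB_eq_sumHalves_aux : ∀ (n : Nat) (l : List Char), l.length ≤ n →
    pairsB l = sumHalves (rleA l) := by
  intro n
  induction n with
  | zero =>
      intro l hl
      have : l = [] := List.length_eq_zero_iff.mp (by omega)
      subst this
      simp [pairsB, rleA, sumHalves]
  | succ n ih =>
      intro l hl
      cases hlc : l with
      | nil => simp [pairsB, rleA, sumHalves]
      | cons c rest =>
          subst hlc
          obtain ⟨m, D, hdec, hm, hDh, hmT, hDd⟩ := front_decomp c rest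
          have hDlen : D.length ≤ n := by
            have h1 : (c :: rest).length = m + D.length := by rw [hdec]; simp
            simp only [List.length_cons] at hl h1
            omega
          rw [hdec, pairsB_run m c D hDh, rleA_run m c D hm hDh, sumHalves_cons,
            ih D hDlen]
          simp

theorem pairsB_eq_sumHalves (l : List Char) : pairsB l = sumHalves (rleA l) :=
  pairsB_eq_sumHalves_aux l.length l le_rfl

-- back run decomposition
theorem back_decomp (l : List Char) (h : l ≠ []) :
    ∃ b p e, l = b ++ List.replicate p e ∧ 1 ≤ p ∧ b.getLast? ≠ some e ∧
      l.getLast? = some e := by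
  obtain ⟨e, r, her⟩ : ∃ e r, l.reverse = e :: r := by
    cases hr : l.reverse with
    | nil => exact absurd (by simpa using congrArg List.reverse hr) h
    | cons e r => exact ⟨e, r, rfl⟩
  obtain ⟨m, D, hdec, hm, hDh, hmT, hDd⟩ := front_decomp e r
  refine ⟨D.reverse, m, e, ?_, hm, ?_, ?_⟩
  · have := congrArg List.reverse (her.trans hdec)
    simpa [List.reverse_append] using this
  · rw [List.getLast?_reverse]
    exact hDh
  · rw [← List.head?_reverse, her]
    rfl

-- single-run characterisation aligning the two branch conditions
theorem single_run_iff (c : Char) (rest : List Char) :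
    ((rleA (c :: rest)).length = 1) ↔ (c :: rest = List.replicate (c :: rest).length c) := by
  obtain ⟨m, D, hdec, hm, hDh, hmT, hDd⟩ := front_decomp c rest
  rw [hdec, rleA_run m c D hm hDh]
  constructor
  · intro h1
    have hD : D = [] := by
      have : rleA D = [] := List.length_eq_zero_iff.mp (by simpa using h1)
      exact (rleA_eq_nil_iff D).mp this
    subst hD
    simp
  · intro h2
    cases hD : D with
    | nil => simp [hD, rleA]
    | cons d t =>
        exfalso
        have hd_mem : d ∈ List.replicate m c ++ D := by
          rw [hD]; exact List.mem_append_right _ List.mem_cons_self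
        have hd_eq : d = c := by
          rw [h2] at hd_mem
          exact List.eq_of_mem_replicate hd_mem
        rw [hD] at hDh
        simp [hd_eq] at hDh

theorem rleA_replicate (p : Nat) (e : Char) (hp : 1 ≤ p) :
    rleA (List.replicate p e) = [(p : Int)] := by
  have h := rleA_run p e [] hp (by simp)
  rw [List.append_nil] at h
  rw [h, rleA]

theorem sumHalves_def (L : List Int) :
    (L.map (fun x => PySem.Int.floordiv x 2)).sum = sumHalves L := rfl

theorem key (s : String) (k : Int) (c : Char) (rest : List Char) (h : s.toList = c :: rest) :
    solve s k = solve_alt s k := by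
  by_cases hone : (rleA (c :: rest)).length = 1
  · -- single-run branch on both sides
    have hrepl := (single_run_iff c rest).mp hone
    unfold solve solve_alt
    rw [h]
    simp only []
    have hb1 : ((rleA (c :: rest)).length == 1) = true := by simp [hone]
    have hb2 : (!(c :: rest : List Char).isEmpty &&
        ((c :: rest : List Char) == List.replicate (c :: rest).length ((c :: rest).headD ' '))) = true := by
      simp only [List.isEmpty_cons, Bool.not_false, Bool.true_and, beq_iff_eq, List.headD_cons]
      exact hrepl
    rw [hb1, hb2]
    simp
  · -- multi-run branch on both sides
    obtain ⟨b, p, e, hbe, hp, hbl, hlast⟩ := back_decomp (c :: rest) (by simp)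
    have hb_ne : b ≠ [] := by
      intro hb0
      subst hb0
      rw [List.nil_append] at hbe
      rw [hbe, rleA_replicate p e hp] at hone
      simp at hone
    have hb_head : b.head? = some c := by
      have := congrArg List.head? hbe
      rw [List.head?_append_of_ne_nil _ hb_ne] at this
      simpa using this.symm
    unfold solve solve_alt
    rw [h]
    simp only []
    have hb1 : ((rleA (c :: rest)).length == 1) = false := by simp [hone]
    have hb2 : (!(c :: rest : List Char).isEmpty &&
        ((c :: rest : List Char) == List.replicate (c :: rest).length ((c :: rest).headD ' '))) = false := by
      simp only [List.isEmpty_cons, Bool.not_false, Bool.true_and, beq_eq_false_iff_ne, ne_eq,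
        List.headD_cons]
      exact fun hr => hone ((single_run_iff c rest).mpr hr)
    rw [hb1, hb2]
    simp only [Bool.false_eq_true, if_false]
    rw [PySem.List.pyGet?_zero_cons]
    rw [PySem.List.pyGet?_neg_one, hlast]
    rw [pairsB_eq_sumHalves, pairsB_eq_sumHalves]
    by_cases hce : c = e
    · -- first and last characters coincide: the copies merge at the junction
      subst hce
      obtain ⟨c0, b', hb'⟩ : ∃ c0 b', b = c0 :: b' := by
        cases b with
        | nil => exact absurd rfl hb_ne
        | cons c0 b' => exact ⟨c0, b', rfl⟩
      have hc0 : c0 = c := by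
        rw [hb'] at hb_head
        simpa using hb_head
      rw [hc0] at hb'
      obtain ⟨m, d, hbd, hm, hdh, hmT, hdd⟩ := front_decomp c b'
      rw [← hb'] at hbd
      have hd_ne : d ≠ [] := by
        intro hd0
        subst hd0
        rw [List.append_nil] at hbd
        rw [hbd, replicate_getLast? m c hm] at hbl
        exact hbl rfl
      have hdl : d.getLast? ≠ some c := by
        rw [← List.getLast?_append_of_ne_nil (List.replicate m c) hd_ne, ← hbd]
        exact hbl
      have hdX : ∀ X : List Char, (d ++ X).head? ≠ some c := by
        intro X
        rw [List.head?_append_of_ne_nil _ hd_ne]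
        exact hdh
      have hL : c :: rest = List.replicate m c ++ (d ++ List.replicate p c) := by
        rw [hbe, hbd, List.append_assoc]
      have R1 : rleA (c :: rest) = (m : Int) :: (rleA d ++ [(p : Int)]) := by
        rw [hL, rleA_run m c _ hm (hdX _),
          rleA_append_ne d _ (by apply List.ne_nil_of_length_pos; simp; omega)
            (by rw [show (List.replicate p c).head? = some c from by
                  obtain ⟨j, rfl⟩ : ∃ j, p = j + 1 := ⟨p - 1, by omega⟩
                  simp [List.replicate_succ]]; exact hdl),
          rleA_replicate p c hp]
      have hLL : (c :: rest) ++ (c :: rest)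
          = List.replicate m c ++ (d ++ (List.replicate (p + m) c ++ (d ++ List.replicate p c))) := by
        rw [hL]
        simp only [List.append_assoc]
        congr 2
        rw [← List.append_assoc, ← List.replicate_add]
      have R2 : rleA ((c :: rest) ++ (c :: rest))
          = (m : Int) :: (rleA d ++ (((p + m : Nat) : Int) :: (rleA d ++ [(p : Int)]))) := by
        rw [hLL, rleA_run m c _ hm (hdX _),
          rleA_append_ne d _ (by apply List.ne_nil_of_length_pos; simp; omega) (by
            rw [show (List.replicate (p + m) c ++ (d ++ List.replicate p c)).head? = some c from by
              obtain ⟨j, hj⟩ : ∃ j, p + m = j + 1 := ⟨p + m - 1, by omega⟩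
              rw [hj]
              simp [List.replicate_succ]]
            exact hdl),
          rleA_run (p + m) c _ (by omega) (hdX _),
          rleA_append_ne d _ (by apply List.ne_nil_of_length_pos; simp; omega)
            (by rw [show (List.replicate p c).head? = some c from by
                  obtain ⟨j, rfl⟩ : ∃ j, p = j + 1 := ⟨p - 1, by omega⟩
                  simp [List.replicate_succ]]; exact hdl),
          rleA_replicate p c hp]
      rw [sumHalves_def, R1, R2]
      have hR1' : ((m : Int) :: (rleA d ++ [(p : Int)])) = ((m : Int) :: rleA d) ++ [(p : Int)] := by
        simp
      rw [hR1', PySem.List.pyGet?_neg_one_append_singleton, ← hR1',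
        PySem.List.pyGet?_zero_cons]
      have hmod : ∀ q : Nat, (PySem.Int.mod (q : Int) 2 == 1) = decide (q % 2 = 1) := by
        intro q
        rw [PySem.Int.mod_eq_emod_of_pos (by omega)]
        by_cases hq : q % 2 = 1
        · have h2 : (q : Int) % 2 = 1 := by omega
          simp [h2, hq]
        · have h2 : (q : Int) % 2 ≠ 1 := by omega
          simp [h2, hq]
      simp only [hmod, beq_self_eq_true, Bool.true_and]
      have hfd : ∀ q : Nat, PySem.Int.floordiv (q : Int) 2 = ((q / 2 : Nat) : Int) := by
        intro q
        rw [PySem.Int.floordiv_eq_ediv_of_pos (by omega)]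
        omega
      simp only [sumHalves_cons, sumHalves_append, sumHalves_nil, hfd]
      by_cases hmo : m % 2 = 1 <;> by_cases hpo : p % 2 = 1
      · have hdiv : (p + m) / 2 = m / 2 + p / 2 + 1 := by omega
        simp only [hmo, hpo, decide_true, Bool.and_self, if_true, hdiv]
        push_cast
        ring
      · have hdiv : (p + m) / 2 = m / 2 + p / 2 := by omega
        simp only [hmo, hpo, decide_true, decide_false, Bool.and_false, Bool.false_eq_true,
          if_false, hdiv]
        push_cast
        ring
      · have hdiv : (p + m) / 2 = m / 2 + p / 2 := by omega
        simp only [hmo, hpo, decide_true, decide_false, Bool.false_and, Bool.false_eq_true,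
          if_false, hdiv]
        push_cast
        ring
      · have hdiv : (p + m) / 2 = m / 2 + p / 2 := by omega
        simp only [hmo, hpo, decide_false, Bool.false_and, Bool.false_eq_true, if_false, hdiv]
        push_cast
        ring
    · -- first and last characters differ: no merge, the correction term is zero
      have hR : rleA ((c :: rest) ++ (c :: rest)) = rleA (c :: rest) ++ rleA (c :: rest) := by
        refine rleA_append_ne _ _ (by simp) ?_
        rw [hlast, List.head?_cons]
        exact fun hec => hce (Option.some.injEq .. ▸ hec :).symm
      obtain ⟨r0, hr0⟩ : ∃ r0, PySem.List.pyGet? (rleA (c :: rest)) 0 = some r0 := by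
        rw [rleA_cons, PySem.List.pyGet?_zero_cons]
        exact ⟨_, rfl⟩
      obtain ⟨r1, hr1⟩ : ∃ r1, PySem.List.pyGet? (rleA (c :: rest)) (-1) = some r1 := by
        rw [PySem.List.pyGet?_neg_one]
        cases hgl : (rleA (c :: rest)).getLast? with
        | none => exact absurd (List.getLast?_eq_none_iff.mp hgl) (rleA_ne_nil c rest)
        | some r1 => exact ⟨r1, rfl⟩
      rw [hr0, hr1]
      have hcefalse : (c == e) = false := by simp [hce]
      simp only [hcefalse, Bool.false_and, Bool.false_eq_true, if_false]
      rw [sumHalves_def, hR, sumHalves_append]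
      ring

-- ===== VERDICT (by name: the statement is the Claim_ definition above) =====
theorem solve_spec : Claim_equal_solve := by
  intro s k _ hpre
  unfold Spec_solve
  obtain ⟨c, rest, hcr⟩ : ∃ c rest, s.toList = c :: rest := by
    cases hh : s.toList with
    | nil => exact absurd (String.toList_eq_nil_iff.mp hh) hpre
    | cons c rest => exact ⟨c, rest, rfl⟩
  exact key s k c rest hcr
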